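-- pv_equiv track=rewrite | github.com/derinworks/penr-oz-redact-pii-tool | src/pii_redact/detector.py | _line_looks_like_header
-- ===== SOURCE A (Python) =====
-- def _line_looks_like_header(text: str) -> bool:
--     lowered = text.lower()
--     return any(
--         token in lowered
--         for token in (
--             "name",
--             "address",
--             "first",
--             "last",
--             "middle",
--             "suffix",
--             "state id",
--             "state no",
--             "control number",
--             "zip",
--             "ssn",
--             "ein",
--         )
--     )
-- ===== SOURCE B (Python) =====
-- # One left-to-right scan of the lowered text; at each position only the tokens
-- # whose first letter matches the current character are tried as prefixes,
-- # instead of twelve independent substring membership tests.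
-- _TOKENS_BY_FIRST = {
--     "n": ("name",),
--     "a": ("address",),
--     "f": ("first",),
--     "l": ("last",),
--     "m": ("middle",),
--     "s": ("suffix", "state id", "state no", "ssn"),
--     "c": ("control number",),
--     "z": ("zip",),
--     "e": ("ein",),
-- }
--
--
-- def _line_looks_like_header(text: str) -> bool:
--     lowered = text.lower()
--     for i, ch in enumerate(lowered):
--         for token in _TOKENS_BY_FIRST.get(ch, ()):
--             if lowered.startswith(token, i):
--                 return True
--     return False
-- ===== Notes on version B (the rewrite author's own statement) =====
-- stated objective: alternative
-- what changed: Replaces twelve independent substring-membership tests of the lowered text by a single left-to-right scan that, at each position, consults a first-character index and tries only the tokens starting with that character as prefixes; not claimed faster (A's tests run in C, B's scan is a Python-level loop).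
import Mathlib
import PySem

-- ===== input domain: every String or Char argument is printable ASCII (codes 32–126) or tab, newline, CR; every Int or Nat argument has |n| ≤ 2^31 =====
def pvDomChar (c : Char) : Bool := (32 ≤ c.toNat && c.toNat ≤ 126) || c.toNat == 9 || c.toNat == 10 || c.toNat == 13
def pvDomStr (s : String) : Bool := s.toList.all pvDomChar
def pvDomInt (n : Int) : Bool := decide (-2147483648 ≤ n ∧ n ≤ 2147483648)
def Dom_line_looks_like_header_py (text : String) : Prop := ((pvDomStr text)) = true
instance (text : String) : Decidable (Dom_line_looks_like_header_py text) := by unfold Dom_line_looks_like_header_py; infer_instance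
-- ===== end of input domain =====

-- B scans the lowered text once, trying at each position only the tokens indexed by its first character; same accepted set as A's twelve substring tests.

-- ===== PORT A =====
def hdrTokens : List (List Char) :=
  [['n','a','m','e'], ['a','d','d','r','e','s','s'], ['f','i','r','s','t'], ['l','a','s','t'],
   ['m','i','d','d','l','e'], ['s','u','f','f','i','x'], ['s','t','a','t','e',' ','i','d'],
   ['s','t','a','t','e',' ','n','o'], ['c','o','n','t','r','o','l',' ','n','u','m','b','e','r'],
   ['z','i','p'], ['s','s','n'], ['e','i','n']]

def line_looks_like_header_py (text : String) : Bool :=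
  let lowered := PySem.Chars.lower text.toList
  hdrTokens.any (fun token => PySem.Chars.isIn token lowered)

-- ===== PORT B =====
-- the module-level dict _TOKENS_BY_FIRST, as a lookup by first character (get with default ())
def hdrGroup (c : Char) : List String :=
  if c = 'n' then ["name"]
  else if c = 'a' then ["address"]
  else if c = 'f' then ["first"]
  else if c = 'l' then ["last"]
  else if c = 'm' then ["middle"]
  else if c = 's' then ["suffix", "state id", "state no", "ssn"]
  else if c = 'c' then ["control number"]
  else if c = 'z' then ["zip"]
  else if c = 'e' then ["ein"]
  else []

-- the `for i, ch in enumerate(lowered)` loop, as recursion over the suffix at position i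
def hdrScan : List Char → Bool
  | [] => false
  | c :: rest =>
      ((hdrGroup c).any (fun token => PySem.Chars.startswith (c :: rest) token.toList))
      || hdrScan rest

def line_looks_like_header_py_alt (text : String) : Bool :=
  hdrScan (PySem.Chars.lower text.toList)

-- ===== PRECONDITION & SPEC =====
def Spec_line_looks_like_header_py (text : String) (out : Bool) : Prop := out = line_looks_like_header_py_alt text
instance (text : String) (out : Bool) : Decidable (Spec_line_looks_like_header_py text out) := by unfold Spec_line_looks_like_header_py; infer_instance

-- ===== CLAIM (what is proved, stated in full; the proofs are below) =====
def Claim_equal_line_looks_like_header_py : Prop := ∀ (text : String), Dom_line_looks_like_header_py text → Spec_line_looks_like_header_py text (line_looks_like_header_py text)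

-- ===== LEMMAS AND PROOFS =====

-- every token in a first-character group is one of the twelve tokens
theorem hdrGroup_subset (c : Char) (t : String) (h : t ∈ hdrGroup c) : t.toList ∈ hdrTokens := by
  unfold hdrGroup at h
  split_ifs at h <;> simp_all [hdrTokens] <;> rcases h with h | h | h | h <;> subst h <;> decide

-- a token that is a prefix of c :: rest lies in the group indexed by c
theorem mem_hdrGroup_of_prefix (c : Char) (rest : List Char) (t : List Char)
    (ht : t ∈ hdrTokens) (hp : t <+: c :: rest) : ∃ s ∈ hdrGroup c, s.toList = t := by
  fin_cases ht <;> obtain ⟨u, hu⟩ := hp <;> injection hu with h1 _ <;> subst h1 <;>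
    first
    | exact ⟨"name", by decide, by decide⟩
    | exact ⟨"address", by decide, by decide⟩
    | exact ⟨"first", by decide, by decide⟩
    | exact ⟨"last", by decide, by decide⟩
    | exact ⟨"middle", by decide, by decide⟩
    | exact ⟨"suffix", by decide, by decide⟩
    | exact ⟨"state id", by decide, by decide⟩
    | exact ⟨"state no", by decide, by decide⟩
    | exact ⟨"control number", by decide, by decide⟩
    | exact ⟨"zip", by decide, by decide⟩
    | exact ⟨"ssn", by decide, by decide⟩
    | exact ⟨"ein", by decide, by decide⟩

-- the scan accepts exactly the lists with some token as infix
theorem hdrScan_iff (l : List Char) :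
    hdrScan l = true ↔ ∃ t ∈ hdrTokens, t <:+: l := by
  induction l with
  | nil =>
      simp only [hdrScan]
      constructor
      · intro h; exact absurd h (by decide)
      · rintro ⟨t, ht, hinf⟩
        rw [List.infix_nil] at hinf; subst hinf
        exact absurd ht (by decide)
  | cons c rest ih =>
      simp only [hdrScan, Bool.or_eq_true, List.any_eq_true, ih]
      constructor
      · rintro (⟨t, ht, hsw⟩ | ⟨t, ht, hinf⟩)
        · exact ⟨t.toList, hdrGroup_subset c t ht,
            ((PySem.Chars.startswith_iff _ _).mp hsw).isInfix⟩
        · exact ⟨t, ht, List.infix_cons hinf⟩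
      · rintro ⟨t, ht, hinf⟩
        rcases List.infix_cons_iff.mp hinf with hp | hinf'
        · obtain ⟨s, hs, hst⟩ := mem_hdrGroup_of_prefix c rest t ht hp
          exact Or.inl ⟨s, hs, (PySem.Chars.startswith_iff _ _).mpr (hst ▸ hp)⟩
        · exact Or.inr ⟨t, ht, hinf'⟩

-- ===== VERDICT (by name: the statement is the Claim_ definition above) =====
theorem line_looks_like_header_py_spec : Claim_equal_line_looks_like_header_py := by
  intro text _
  unfold Spec_line_looks_like_header_py line_looks_like_header_py line_looks_like_header_py_alt
  rw [Bool.eq_iff_iff]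
  simp only [List.any_eq_true, PySem.Chars.isIn_iff_infix, hdrScan_iff]
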